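-- pv_equiv track=rewrite | github.com/pypi-data/pypi-mirror-350 | packages/aitool/aitool-0.0.294.tar.gz/aitool-0.0.294/aitool/r0_standard/string_op.py | ngrams_permutation
-- ===== SOURCE A (Python) =====
-- from typing import Tuple, Union, List, Iterator
--
-- def get_ngram(text: str, ngram: int = 2, no_chars: str = '') -> Iterator[str]:
--     """
--     获取text的所有ngram片段
--
--     :param no_chars: ngram里不可以保护的char集
--     :param text: 文本
--     :param ngram: 判断的字长
--     :return: text的所有ngram片段
--
--     >>> list(get_ngram('abcd'))
--     ['ab', 'bc', 'cd']
--     >>> list(get_ngram('ab', ngram=2))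
--     ['ab']
--     >>> list(get_ngram('ab', ngram=3))
--     []
--     """
--     for i in range(len(text)-ngram+1):
--         n = text[i: i+ngram]
--         if len(set(n) & set(no_chars)) > 0:
--             continue
--         yield n
--
-- def get_ngrams(text: Union[str, List[str]], min_gram: int, max_gram: int) -> List[str]:
--     """
--     获取text的多个ngram片段
--
--     :param text: 字符串或list
--     :param min_gram: 最小gram数
--     :param max_gram: 最大gram数
--     :return: ngram片段
--
--     >>> list(get_ngrams('abcd', 1, 3))
--     ['a', 'b', 'c', 'd', 'ab', 'bc', 'cd', 'abc', 'bcd']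
--     >>> list(get_ngrams(['a', 'bc', 'd', 'ef'], 1, 3))
--     [['a'], ['bc'], ['d'], ['ef'], ['a', 'bc'], ['bc', 'd'], ['d', 'ef'], ['a', 'bc', 'd'], ['bc', 'd', 'ef']]
--     """
--     rst = []
--     for ngram in range(min_gram, max_gram+1):
--         rst.extend(list(get_ngram(text, ngram)))
--     return rst
--
-- def ngrams_permutation(text: Union[str, List[str]], min_gram: int, max_gram: int) -> List[List]:
--     """
--     获取text的多个ngram片段
--
--     :param text: 字符串或list
--     :param min_gram: 最小gram数
--     :param max_gram: 最大gram数
--     :return: ngram片段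
--
--     >>> list(ngrams_permutation('abcd', 1, 3))
--     [['a', 'b', 'c', 'd'], ['a', 'b', 'cd'], ['a', 'bc', 'd'], ['a', 'bcd'], ['ab', 'c', 'd'], ['ab', 'cd'], ['abc', 'd']]
--     >>> list(ngrams_permutation(['a', 'bc', 'd', 'ef'], 1, 3))
--     [[['a'], ['bc'], ['d'], ['ef']], [['a'], ['bc'], ['d', 'ef']], [['a'], ['bc', 'd'], ['ef']], [['a'], ['bc', 'd', 'ef']], [['a', 'bc'], ['d'], ['ef']], [['a', 'bc'], ['d', 'ef']], [['a', 'bc', 'd'], ['ef']]]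
--     """
--     def _permutation(remainder, prefix, items):
--         if len(remainder) == 0:
--             yield prefix
--         for item in items:
--             len_item = len(item)
--             if remainder[:len_item] == item:
--                 yield from _permutation(remainder[len_item:], prefix+[item], items)
--
--     ngrams = get_ngrams(text, min_gram, max_gram)
--     yield from _permutation(text, [], ngrams)
-- ===== SOURCE B (Python) =====
-- def ngrams_permutation(text, min_gram, max_gram):
--     """All segmentations of text into pieces drawn from its min..max-gram list,
--     computed bottom-up: tails[p] holds every segmentation of text[p:]."""
--     pieces = [text[i:i + L]
--               for L in range(min_gram, max_gram + 1)
--               for i in range(len(text) - L + 1)]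
--     n = len(text)
--     tails = [None] * (n + 1)
--     tails[n] = [[]]
--     for p in range(n - 1, -1, -1):
--         segs = []
--         for piece in pieces:
--             L = len(piece)
--             if text[p:p + L] == piece:
--                 segs.extend([piece] + t for t in tails[p + L])
--         tails[p] = segs
--     yield from tails[0]
-- ===== Notes on version B (the rewrite author's own statement) =====
-- stated objective: alternative
-- what changed: A segments by top-down generator recursion, re-slicing the remainder string and carrying a growing prefix at every node; B builds a bottom-up dynamic-programming table tails[p] of all segmentations of text[p:], computing each suffix position once and reading results off tails[0].
import Mathlib
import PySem

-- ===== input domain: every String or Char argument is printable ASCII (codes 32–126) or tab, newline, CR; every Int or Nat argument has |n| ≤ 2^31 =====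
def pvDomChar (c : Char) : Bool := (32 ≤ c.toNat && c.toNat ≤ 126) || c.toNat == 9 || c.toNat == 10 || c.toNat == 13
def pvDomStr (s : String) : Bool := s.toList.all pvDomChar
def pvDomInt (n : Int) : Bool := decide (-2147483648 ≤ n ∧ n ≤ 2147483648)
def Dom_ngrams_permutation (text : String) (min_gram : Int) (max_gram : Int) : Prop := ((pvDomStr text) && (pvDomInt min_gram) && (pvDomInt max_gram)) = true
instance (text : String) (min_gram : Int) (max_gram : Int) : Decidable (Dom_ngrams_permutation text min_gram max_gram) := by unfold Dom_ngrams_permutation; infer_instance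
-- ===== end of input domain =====

-- B replaces A's top-down generator recursion (re-slicing the remainder and
-- carrying a prefix at every node) by a bottom-up DP table tails[p] of all
-- segmentations of text[p:]; equal return value proved on Pre_.

-- ===== PORT A =====
-- Python strings are ported as their character lists (text.toList); a piece of
-- the output is converted back with String.ofList at the end.

-- get_ngram(text, ngram, no_chars): text[i:i+ngram] is PySem.List.slice;
-- `len(set(n) & set(no_chars)) > 0` is the length of PySem.Set.inter.
def pvGetNgramA (cs : List Char) (ngram : Int) (no_chars : List Char) : List (List Char) :=
  (PySem.List.pyRange 0 ((cs.length : Int) - ngram + 1) 1).foldl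
    (fun acc i =>
      let n := PySem.List.slice cs (some i) (some (i + ngram))
      if 0 < (PySem.Set.inter (PySem.Set.ofList n) (PySem.Set.ofList no_chars)).length
      then acc
      else acc ++ [n]) []

-- get_ngrams(text, min_gram, max_gram) (call site: no_chars = '')
def pvGetNgramsA (cs : List Char) (min_gram max_gram : Int) : List (List Char) :=
  (PySem.List.pyRange min_gram (max_gram + 1) 1).foldl
    (fun rst ngram => rst ++ pvGetNgramA cs ngram []) []

-- _permutation(remainder, prefix, items).  remainder[:len_item] / remainder[len_item:]
-- with the nonnegative index len_item = len(item) are exactly take/drop.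
-- fuel is a totality guard only: the Python recursion diverges exactly where
-- fuel could run out (an empty item, excluded by Pre_); with items nonempty,
-- depth ≤ len(remainder) + 1, so fuel = len(text) + 1 at the top level is exact.
def pvPermA (items : List (List Char)) : Nat → List Char → List (List Char) → List (List (List Char))
  | 0, _, _ => []
  | fuel+1, remainder, prefx =>
    (if remainder.length = 0 then [prefx] else []) ++
    items.foldl
      (fun acc item =>
        acc ++ (if remainder.take item.length = item
                then pvPermA items fuel (remainder.drop item.length) (prefx ++ [item])
                else [])) []

def ngrams_permutation (text : String) (min_gram : Int) (max_gram : Int) : List (List String) :=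
  (pvPermA (pvGetNgramsA text.toList min_gram max_gram)
      (text.toList.length + 1) text.toList []).map (fun seg => seg.map String.ofList)

-- ===== PORT B =====
-- pieces = [text[i:i+L] for L in range(min_gram, max_gram+1) for i in range(len(text)-L+1)]
def pvPiecesB (cs : List Char) (min_gram max_gram : Int) : List (List Char) :=
  (PySem.List.pyRange min_gram (max_gram + 1) 1).flatMap (fun L =>
    (PySem.List.pyRange 0 ((cs.length : Int) - L + 1) 1).map
      (fun i => PySem.List.slice cs (some i) (some (i + L))))

-- the body of B's loop at position p: segs over all pieces matching text[p:p+L]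
def pvSegsAt (cs : List Char) (pieces : List (List Char))
    (tails : List (List (List (List Char)))) (p : Nat) : List (List (List Char)) :=
  pieces.foldl
    (fun segs piece =>
      if PySem.List.slice cs (some (p : Int)) (some ((p : Int) + (piece.length : Int))) = piece
      then segs ++ (tails.getD (p + piece.length) []).map (fun t => piece :: t)
      else segs) []

-- tails = [None]*(n+1); tails[n] = [[]]; for p in range(n-1,-1,-1): tails[p] = segs.
-- None is ported as the placeholder []; under Pre_ the loop only reads entries
-- p+L with L ≥ 1, already assigned, so the placeholder is never read.
def ngrams_permutation_alt (text : String) (min_gram : Int) (max_gram : Int) : List (List String) :=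
  let cs := text.toList
  let n := cs.length
  let pieces := pvPiecesB cs min_gram max_gram
  let init := (List.replicate (n + 1) ([] : List (List (List Char)))).set n [[]]
  let tails := (PySem.List.pyRange ((n : Int) - 1) (-1) (-1)).foldl
    (fun tails p => tails.set p.toNat (pvSegsAt cs pieces tails p.toNat)) init
  (tails.getD 0 []).map (fun seg => seg.map String.ofList)

-- ===== PRECONDITION & SPEC =====
-- When min_gram ≤ 0 and the gram range is nonempty, A's ngram list contains the
-- empty string, so A's recursion never terminates (Python RecursionError);
-- Pre_ excludes exactly those inputs.
def Pre_ngrams_permutation (text : String) (min_gram : Int) (max_gram : Int) : Prop :=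
  1 ≤ min_gram ∨ max_gram < min_gram
instance (text : String) (min_gram : Int) (max_gram : Int) : Decidable (Pre_ngrams_permutation text min_gram max_gram) := by unfold Pre_ngrams_permutation; infer_instance

def pvWitness_ngrams_permutation : String × Int × Int := ("abab", 1, 2)

def Spec_ngrams_permutation (text : String) (min_gram : Int) (max_gram : Int) (out : List (List String)) : Prop := out = ngrams_permutation_alt text min_gram max_gram
instance (text : String) (min_gram : Int) (max_gram : Int) (out : List (List String)) : Decidable (Spec_ngrams_permutation text min_gram max_gram out) := by unfold Spec_ngrams_permutation; infer_instance

-- ===== CLAIM (what is proved, stated in full; the proofs are below) =====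
def Claim_equal_ngrams_permutation : Prop := ∀ (text : String) (min_gram : Int) (max_gram : Int), Dom_ngrams_permutation text min_gram max_gram → Pre_ngrams_permutation text min_gram max_gram → Spec_ngrams_permutation text min_gram max_gram (ngrams_permutation text min_gram max_gram)

-- ===== LEMMAS AND PROOFS =====

-- the list of all pieces of length k, by start position (one gram size's row)
def pvRow (cs : List Char) (k : Nat) : List (List Char) :=
  (List.range (cs.length + 1 - k)).map (fun i => (cs.drop i).take k)

theorem pvRow_len {cs : List Char} {k : Nat} {e : List Char} (he : e ∈ pvRow cs k) :
    e.length = k := by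
  unfold pvRow at he
  simp only [List.mem_map, List.mem_range] at he
  obtain ⟨i, hi, rfl⟩ := he
  rw [List.length_take, List.length_drop]
  omega

theorem pvRowMap (cs : List Char) (L : Int) (hL : 0 ≤ L) :
    (PySem.List.pyRange 0 ((cs.length : Int) - L + 1) 1).map
      (fun i => PySem.List.slice cs (some i) (some (i + L))) = pvRow cs L.toNat := by
  rw [PySem.List.pyRange_one, List.map_map]
  unfold pvRow
  have hrange : ((cs.length : Int) - L + 1 - 0).toNat = cs.length + 1 - L.toNat := by omega
  rw [hrange]
  apply List.map_congr_left
  intro k hk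
  simp only [Function.comp]
  rw [PySem.List.slice_toNat cs (by omega) (by omega)]
  have h1 : ((0 : Int) + (k : Int) + L).toNat - ((0 : Int) + (k : Int)).toNat = L.toNat := by omega
  have h2 : ((0 : Int) + (k : Int)).toNat = k := by omega
  rw [h1, h2]

theorem pvGetNgramA_eq_row (cs : List Char) (L : Int) (hL : 0 ≤ L) :
    pvGetNgramA cs L [] = pvRow cs L.toNat := by
  unfold pvGetNgramA
  rw [PySem.List.foldl_congr_mem _ _
      (fun acc i => acc ++ [PySem.List.slice cs (some i) (some (i + L))]) _
      (by intro acc i _; simp [PySem.Set.inter, PySem.Set.ofList])]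
  rw [PySem.List.foldl_append_singleton_eq_map, List.nil_append]
  exact pvRowMap cs L hL

theorem pvGetNgramsA_eq_flatMap (cs : List Char) (min_gram max_gram : Int)
    (h : ∀ L ∈ PySem.List.pyRange min_gram (max_gram + 1) 1, 1 ≤ L) :
    pvGetNgramsA cs min_gram max_gram
      = (PySem.List.pyRange min_gram (max_gram + 1) 1).flatMap (fun L => pvRow cs L.toNat) := by
  unfold pvGetNgramsA
  rw [PySem.List.foldl_congr_mem _ _ (fun rst L => rst ++ pvRow cs L.toNat) _
      (by intro acc L hL; rw [pvGetNgramA_eq_row cs L (by have := h L hL; omega)])]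
  rw [PySem.List.foldl_append_eq_flatMap]
  simp

theorem pvPiecesB_eq_flatMap (cs : List Char) (min_gram max_gram : Int)
    (h : ∀ L ∈ PySem.List.pyRange min_gram (max_gram + 1) 1, 1 ≤ L) :
    pvPiecesB cs min_gram max_gram
      = (PySem.List.pyRange min_gram (max_gram + 1) 1).flatMap (fun L => pvRow cs L.toNat) := by
  unfold pvPiecesB
  apply List.flatMap_congr
  intro L hL
  exact pvRowMap cs L (by have := h L hL; omega)

-- a matched piece fits inside the suffix
theorem pvMatch_le {cs : List Char} {pos : Nat} {piece : List Char} (hpos : pos ≤ cs.length)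
    (hc : (cs.drop pos).take piece.length = piece) : pos + piece.length ≤ cs.length := by
  have := congrArg List.length hc
  rw [List.length_take, List.length_drop] at this
  omega

-- reference segmentation function: all segmentations of cs.drop pos (fuel-indexed)
def pvTailsF (cs : List Char) (pieces : List (List Char)) : Nat → Nat → List (List (List Char))
  | 0, _ => []
  | fuel+1, pos =>
    if pos = cs.length then [[]]
    else pieces.flatMap (fun piece =>
      if (cs.drop pos).take piece.length = piece
      then (pvTailsF cs pieces fuel (pos + piece.length)).map (fun t => piece :: t)
      else [])

theorem pvTailsF_succ (cs : List Char) (pieces : List (List Char)) (fuel pos : Nat) :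
    pvTailsF cs pieces (fuel + 1) pos
      = if pos = cs.length then [[]]
        else pieces.flatMap (fun piece =>
          if (cs.drop pos).take piece.length = piece
          then (pvTailsF cs pieces fuel (pos + piece.length)).map (fun t => piece :: t)
          else []) := by
  simp only [pvTailsF]

theorem pvTailsF_fuel (cs : List Char) (pieces : List (List Char))
    (hne : ∀ item ∈ pieces, item ≠ []) :
    ∀ fuel fuel' pos, pos ≤ cs.length → cs.length - pos < fuel → cs.length - pos < fuel' →
      pvTailsF cs pieces fuel pos = pvTailsF cs pieces fuel' pos := by
  intro fuel
  induction fuel with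
  | zero => intro fuel' pos _ hf _; omega
  | succ fuel ih =>
    intro fuel' pos hle hf hf'
    cases fuel' with
    | zero => omega
    | succ fuel' =>
      simp only [pvTailsF]
      by_cases hpos : pos = cs.length
      · simp [hpos]
      · rw [if_neg hpos, if_neg hpos]
        apply List.flatMap_congr
        intro piece hp
        by_cases hc : (cs.drop pos).take piece.length = piece
        · rw [if_pos hc, if_pos hc]
          have h1 : pos + piece.length ≤ cs.length := pvMatch_le hle hc
          have h2 : 1 ≤ piece.length := by
            have := hne piece hp
            cases piece with
            | nil => exact absurd rfl this
            | cons a l => simp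
          rw [ih fuel' (pos + piece.length) h1 (by omega) (by omega)]
        · rw [if_neg hc, if_neg hc]

-- A's recursion computes pvTailsF mapped over the carried prefix
theorem pvPermA_eq (cs : List Char) (pieces : List (List Char))
    (hne : ∀ item ∈ pieces, item ≠ []) :
    ∀ fuel pos prefx, pos ≤ cs.length →
      pvPermA pieces fuel (cs.drop pos) prefx
        = (pvTailsF cs pieces fuel pos).map (prefx ++ ·) := by
  intro fuel
  induction fuel with
  | zero => intro pos prefx _; simp [pvPermA, pvTailsF]
  | succ fuel ih =>
    intro pos prefx hle
    by_cases hpos : pos = cs.length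
    · subst hpos
      simp only [pvPermA, pvTailsF, List.drop_length]
      rw [PySem.List.foldl_congr_mem _ _ (fun acc (_ : List Char) => acc) _ ?_]
      · simp
      · intro acc item hitem
        have : ¬ (([] : List Char).take item.length = item) := by
          rw [List.take_nil]
          intro hc
          exact hne item hitem hc.symm
        rw [if_neg this, List.append_nil]
    · have hlt : pos < cs.length := by omega
      simp only [pvPermA, pvTailsF, if_neg hpos]
      rw [if_neg (by rw [List.length_drop]; omega)]
      rw [PySem.List.foldl_append_eq_flatMap, List.nil_append, List.nil_append,
          List.map_flatMap]
      apply List.flatMap_congr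
      intro piece hp
      by_cases hc : (cs.drop pos).take piece.length = piece
      · rw [if_pos hc, if_pos hc]
        rw [List.drop_drop]
        rw [ih (pos + piece.length) (prefx ++ [piece]) (pvMatch_le hle hc)]
        rw [List.map_map]
        apply List.map_congr_left
        intro t _
        simp
      · rw [if_neg hc, if_neg hc, List.map_nil]

-- B's inner loop at position p computes pvTailsF, given the table below p is correct
theorem pvSegsAt_eq (cs : List Char) (pieces : List (List Char))
    (hne : ∀ item ∈ pieces, item ≠ []) (tails : List (List (List (List Char)))) (k : Nat)
    (hk : k < cs.length)
    (htab : ∀ p, k + 1 ≤ p → p ≤ cs.length →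
      tails.getD p [] = pvTailsF cs pieces (cs.length - p + 1) p) :
    pvSegsAt cs pieces tails k = pvTailsF cs pieces (cs.length - k + 1) k := by
  have hexp : cs.length - k + 1 = (cs.length - k - 1 + 1) + 1 := by omega
  rw [hexp, pvTailsF_succ, if_neg (by omega : ¬ k = cs.length)]
  unfold pvSegsAt
  rw [PySem.List.foldl_congr_mem _ _
      (fun segs piece =>
        segs ++ (if (cs.drop k).take piece.length = piece
          then (pvTailsF cs pieces (cs.length - k - 1 + 1) (k + piece.length)).map
                 (fun t => piece :: t)
          else [])) _ ?_]
  · rw [PySem.List.foldl_append_eq_flatMap, List.nil_append]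
  · intro segs piece hp
    have hsl : PySem.List.slice cs (some (k : Int)) (some ((k : Int) + (piece.length : Int)))
        = (cs.drop k).take piece.length := by
      rw [PySem.List.slice_toNat cs (by omega) (by omega)]
      have h1 : ((k : Int) + (piece.length : Int)).toNat - ((k : Int)).toNat = piece.length := by
        omega
      have h2 : ((k : Int)).toNat = k := by omega
      rw [h1, h2]
    rw [hsl]
    beta_reduce
    by_cases hc : (cs.drop k).take piece.length = piece
    · rw [if_pos hc, if_pos hc]
      have hlen : 1 ≤ piece.length := by
        have := hne piece hp
        cases piece with
        | nil => exact absurd rfl this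
        | cons a l => simp
      have hle : k + piece.length ≤ cs.length := pvMatch_le (by omega) hc
      rw [htab (k + piece.length) (by omega) hle]
      rw [pvTailsF_fuel cs pieces hne (cs.length - (k + piece.length) + 1)
            (cs.length - k - 1 + 1) (k + piece.length) hle (by omega) (by omega)]
    · rw [if_neg hc, if_neg hc, List.append_nil]

-- B's descending loop fills the table with pvTailsF
theorem pvDP (cs : List Char) (pieces : List (List Char))
    (hne : ∀ item ∈ pieces, item ≠ []) :
    ∀ (p0 : Nat), p0 ≤ cs.length → ∀ (tails : List (List (List (List Char)))),
      tails.length = cs.length + 1 →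
      (∀ p, p0 ≤ p → p ≤ cs.length →
        tails.getD p [] = pvTailsF cs pieces (cs.length - p + 1) p) →
      ∀ q, q ≤ cs.length →
        (((PySem.List.pyRange ((p0 : Int) - 1) (-1) (-1)).foldl
            (fun tails p => tails.set p.toNat (pvSegsAt cs pieces tails p.toNat)) tails).getD q [])
          = pvTailsF cs pieces (cs.length - q + 1) q := by
  intro p0
  induction p0 with
  | zero =>
    intro _ tails _ htab q hq
    rw [PySem.List.pyRange_neg_one_eq_nil (by omega)]
    exact htab q (by omega) hq
  | succ k ih =>
    intro hk tails hlen htab q hq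
    have he : (((k + 1 : Nat) : Int) - 1) = (k : Int) := by push_cast; ring
    rw [he, PySem.List.pyRange_neg_one_cons (by omega : (-1 : Int) < (k : Int)),
        List.foldl_cons]
    have hkn : (k : Int).toNat = k := by omega
    rw [hkn]
    have hsegs : pvSegsAt cs pieces tails k = pvTailsF cs pieces (cs.length - k + 1) k :=
      pvSegsAt_eq cs pieces hne tails k (by omega)
        (fun p hp1 hp2 => htab p hp1 hp2)
    apply ih (by omega)
    · rw [List.length_set]; exact hlen
    · intro p hp1 hp2
      by_cases hpk : p = k
      · subst hpk
        rw [List.getD_eq_getElem?_getD, List.getElem?_set_self (by omega), Option.getD_some,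
            hsegs]
      · rw [List.getD_eq_getElem?_getD, List.getElem?_set_ne (by omega),
            ← List.getD_eq_getElem?_getD]
        exact htab p (by omega) hp2
    · exact hq

-- ===== VERDICT (by name: the statement is the Claim_ definition above) =====
theorem ngrams_permutation_spec : Claim_equal_ngrams_permutation := by
  intro text min_gram max_gram _hdom hpre
  unfold Spec_ngrams_permutation ngrams_permutation ngrams_permutation_alt
  have h : ∀ L ∈ PySem.List.pyRange min_gram (max_gram + 1) 1, 1 ≤ L := by
    intro L hL
    rcases hpre with h1 | h2
    · have := PySem.List.mem_pyRange_one.mp hL; omega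
    · rw [PySem.List.pyRange_one_eq_nil (by omega)] at hL; cases hL
  set cs := text.toList with hcs
  set pieces := (PySem.List.pyRange min_gram (max_gram + 1) 1).flatMap
    (fun L => pvRow cs L.toNat) with hpieces
  have hne : ∀ item ∈ pieces, item ≠ [] := by
    intro item hitem hemp
    obtain ⟨L, hLR, hrow⟩ := List.mem_flatMap.mp hitem
    have h1 := pvRow_len hrow
    have h2 := h L hLR
    rw [hemp] at h1
    simp at h1
    omega
  have hA : pvGetNgramsA cs min_gram max_gram = pieces := pvGetNgramsA_eq_flatMap cs _ _ h
  have hB : pvPiecesB cs min_gram max_gram = pieces := pvPiecesB_eq_flatMap cs _ _ h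
  simp only [hA, hB]
  have hAside := pvPermA_eq cs pieces hne (cs.length + 1) 0 [] (by omega)
  rw [List.drop_zero] at hAside
  have hinit_len : ((List.replicate (cs.length + 1) ([] : List (List (List Char)))).set
      cs.length [[]]).length = cs.length + 1 := by
    rw [List.length_set, List.length_replicate]
  have hinit_tab : ∀ p, cs.length ≤ p → p ≤ cs.length →
      ((List.replicate (cs.length + 1) ([] : List (List (List Char)))).set
        cs.length [[]]).getD p [] = pvTailsF cs pieces (cs.length - p + 1) p := by
    intro p hp1 hp2
    have hpn : p = cs.length := by omega
    subst hpn
    rw [List.getD_eq_getElem?_getD, List.getElem?_set_self (by simp), Option.getD_some]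
    have : cs.length - cs.length + 1 = 1 := by omega
    rw [this]
    simp [pvTailsF]
  have hBside := pvDP cs pieces hne cs.length (le_refl _) _ hinit_len hinit_tab 0 (by omega)
  rw [hAside, hBside]
  have : cs.length - 0 + 1 = cs.length + 1 := by omega
  rw [this]
  simp
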